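-- pv_equiv track=rewrite | github.com/clp-research/new-old-discourse-entities | extract_pretrained_hidden.py | produce_all_partitions
-- ===== SOURCE A (Python) =====
-- def produce_all_partitions(array, len_original):
--     n = len(array)
--     partitions = []
--
--     for partition_index in range(2 ** (n-1)):
--         # current partition, e.g., [['a', 'b'], ['c', 'd', 'e']]
--         partition = []
--         # used to accumulate the subsets, e.g., ['a', 'b']
--         subset = []
--         for position in range(n):
--
--             subset.append(array[position])
--
--             # check whether to "break off" a new subset
--             if 1 << position & partition_index or position == n-1:
--                 partition.append(subset)
--                 subset = []
--
--         if len(partition) == len_original: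
--             partitions.append(partition)
--
--     return partitions
-- ===== SOURCE B (Python) =====
-- def produce_all_partitions(array, len_original):
--     # Enumerate only partitions with exactly len_original parts, recursing on the
--     # start index of the last part (colex order = A's ascending-mask order).
--     def parts(m, k):
--         # partitions of array[:m] into k nonempty consecutive parts, mask-ascending
--         if k < 1:
--             return []
--         if k == 1:
--             return [[array[:m]]] if m >= 1 else []
--         return [p + [array[c:m]] for c in range(k - 1, m) for p in parts(c, k - 1)]
--     if len_original < 1:
--         return []
--     return parts(len(array), len_original)
-- ===== Notes on version B (the rewrite author's own statement) =====
-- stated objective: alternative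
-- what changed: A scans all 2^(n-1) cut masks and keeps the partitions with len_original parts; B recursively enumerates, in the same ascending-mask (colex) order, only the cut-point choices that yield exactly len_original parts (C(n-1,k-1) candidates instead of 2^(n-1); the output itself is exponential, so a timing run could not confirm a speed-up at its largest size).
import Mathlib
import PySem

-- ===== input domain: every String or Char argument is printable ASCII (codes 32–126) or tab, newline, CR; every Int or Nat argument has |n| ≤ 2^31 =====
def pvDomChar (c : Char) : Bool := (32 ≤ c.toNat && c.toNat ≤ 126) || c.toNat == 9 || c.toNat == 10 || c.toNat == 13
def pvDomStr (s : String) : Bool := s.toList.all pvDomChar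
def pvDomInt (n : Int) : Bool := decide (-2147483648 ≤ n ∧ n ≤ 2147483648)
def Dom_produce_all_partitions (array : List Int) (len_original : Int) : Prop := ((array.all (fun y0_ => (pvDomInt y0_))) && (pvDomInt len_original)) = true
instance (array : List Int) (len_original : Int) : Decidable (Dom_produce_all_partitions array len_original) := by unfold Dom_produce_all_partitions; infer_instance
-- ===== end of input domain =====

-- B replaces A's scan over all 2^(n-1) cut masks by a recursion on the start of the last
-- part that generates, in the same (ascending-mask / colex) order, only the cut choices
-- with exactly len_original parts — objective: alternative algorithm (fewer candidates).


-- ===== PORT A =====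
-- literal port of A; array[position] is always in range (0 ≤ position < len(array)), so getD is exact
def produce_all_partitions (array : List Int) (len_original : Int) : List (List (List Int)) :=
  let n := array.length
  (List.range (2 ^ (n - 1))).foldl
    (fun partitions partition_index =>
      let st : List (List Int) × List Int :=
        (List.range n).foldl
          (fun (st : List (List Int) × List Int) position =>
            let subset := st.2 ++ [array.getD position 0]
            if ((1 <<< position) &&& partition_index ≠ 0) ∨ position = n - 1 then
              (st.1 ++ [subset], [])
            else
              (st.1, subset))
          ([], [])
      if (st.1.length : Int) = len_original then partitions ++ [st.1] else partitions)
    []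

-- ===== PORT B =====
-- partitions of array[:m] into k nonempty consecutive parts, ascending-mask order
def altParts (array : List Int) : Nat → Nat → List (List (List Int))
  | 0, _ => []
  | 1, m => if 1 ≤ m then [[array.take m]] else []
  | (k+2), m =>
      (List.range' (k+1) (m - (k+1))).flatMap
        (fun c => (altParts array (k+1) c).map (fun p => p ++ [(array.drop c).take (m - c)]))

def produce_all_partitions_alt (array : List Int) (len_original : Int) : List (List (List Int)) :=
  if len_original < 1 then [] else altParts array len_original.toNat array.length

-- ===== PRECONDITION & SPEC =====
-- Pre_ excludes only the empty array, on which A raises TypeError (range(2**(-1)) = range(0.5)).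
def Pre_produce_all_partitions (array : List Int) (len_original : Int) : Prop := array ≠ []
instance (array : List Int) (len_original : Int) : Decidable (Pre_produce_all_partitions array len_original) := by unfold Pre_produce_all_partitions; infer_instance
def pvWitness_produce_all_partitions : List Int × Int := ([1, 2, 3], 2)

def Spec_produce_all_partitions (array : List Int) (len_original : Int) (out : List (List (List Int))) : Prop := out = produce_all_partitions_alt array len_original
instance (array : List Int) (len_original : Int) (out : List (List (List Int))) : Decidable (Spec_produce_all_partitions array len_original out) := by unfold Spec_produce_all_partitions; infer_instance

-- ===== CLAIM (what is proved, stated in full; the proofs are below) =====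
def Claim_equal_produce_all_partitions : Prop := ∀ (array : List Int) (len_original : Int), Dom_produce_all_partitions array len_original → Pre_produce_all_partitions array len_original → Spec_produce_all_partitions array len_original (produce_all_partitions array len_original)
-- ===== LEMMAS AND PROOFS =====

-- A's inner-loop step and the partition it produces for a given mask, with loop length m
def pvStep (array : List Int) (m idx : Nat) (st : List (List Int) × List Int) (position : Nat) : List (List Int) × List Int :=
  let subset := st.2 ++ [array.getD position 0]
  if ((1 <<< position) &&& idx ≠ 0) ∨ position = m - 1 then (st.1 ++ [subset], []) else (st.1, subset)

def pvRun (array : List Int) (m idx : Nat) : List (List Int) × List Int :=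
  (List.range m).foldl (pvStep array m idx) ([], [])

def pvPart (array : List Int) (m idx : Nat) : List (List Int) := (pvRun array m idx).1

theorem pvBit (p idx : Nat) : ((1 <<< p) &&& idx ≠ 0) ↔ idx.testBit p := by
  rw [Nat.one_shiftLeft]
  constructor
  · intro h; by_contra hb; simp [Nat.and_comm, Nat.and_two_pow, hb] at h
  · intro h; simp [Nat.and_comm, Nat.and_two_pow, h]

theorem pvA_shape (array : List Int) (L : Int) :
    produce_all_partitions array L =
      ((List.range (2 ^ (array.length - 1))).map (pvPart array array.length)).filter
        (fun p => decide ((p.length : Int) = L)) := by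
  show (List.range (2 ^ (array.length - 1))).foldl
      (fun acc idx => if ((pvPart array array.length idx).length : Int) = L
        then acc ++ [pvPart array array.length idx] else acc) [] = _
  rw [PySem.List.foldl_append_ite (p := fun idx => ((pvPart array array.length idx).length : Int) = L)
    (f := pvPart array array.length)]
  rw [List.filter_map]
  rfl

-- the tail run: no cut bit fires until the forced final cut
theorem pvTail (array : List Int) (m idx : Nat) (len : Nat) :
    ∀ a P s, a + len = m → 1 ≤ len → m ≤ array.length →
    (∀ pos, a ≤ pos → pos < m - 1 → ¬ idx.testBit pos) →
    (List.range' a len).foldl (pvStep array m idx) (P, s) =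
      (P ++ [s ++ (array.drop a).take (m - a)], []) := by
  induction len with
  | zero => omega
  | succ l ih =>
    intro a P s hsum _ hm hbits
    rw [List.range'_succ, List.foldl_cons]
    have ha : a < array.length := by omega
    rcases Nat.eq_zero_or_pos l with hl | hl
    · subst hl
      have hae : a = m - 1 := by omega
      have : pvStep array m idx (P, s) a = (P ++ [s ++ [array.getD a 0]], []) := by
        simp [pvStep, hae]
      rw [this]
      simp only [List.range'_zero, List.foldl_nil]
      have hma : m - a = 1 := by omega
      rw [hma, List.drop_eq_getElem_cons ha, List.take_succ_cons, List.take_zero,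
        List.getD_eq_getElem array 0 ha]
    · have hcut : a < m - 1 := by omega
      have hstep : pvStep array m idx (P, s) a = (P, s ++ [array.getD a 0]) := by
        have hb := hbits a (le_refl a) hcut
        rw [← pvBit] at hb
        simp [pvStep]
        push Not at hb
        exact ⟨hb, by omega⟩
      rw [hstep, ih (a+1) P (s ++ [array.getD a 0]) (by omega) hl hm
        (fun pos hp hp2 => hbits pos (by omega) hp2)]
      have hdrop : (array.drop a).take (m - a) =
          array.getD a 0 :: (array.drop (a+1)).take (m - (a+1)) := by
        rw [List.drop_eq_getElem_cons ha, List.getD_eq_getElem array 0 ha]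
        have : m - a = (m - (a+1)) + 1 := by omega
        rw [this, List.take_succ_cons]
      rw [hdrop]
      simp

theorem pvRun_snd (array : List Int) (m idx : Nat) (h : 1 ≤ m) : (pvRun array m idx).2 = [] := by
  obtain ⟨t, rfl⟩ : ∃ t, m = t + 1 := ⟨m - 1, by omega⟩
  unfold pvRun
  rw [List.range_succ, List.foldl_append]
  simp [pvStep]

theorem pvPart_pos (array : List Int) (m idx : Nat) (h : 1 ≤ m) : 1 ≤ (pvPart array m idx).length := by
  obtain ⟨t, rfl⟩ : ∃ t, m = t + 1 := ⟨m - 1, by omega⟩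
  unfold pvPart pvRun
  rw [List.range_succ, List.foldl_append]
  simp [pvStep]

theorem pvPart_zero (array : List Int) (m : Nat) (h1 : 1 ≤ m) (h2 : m ≤ array.length) :
    pvPart array m 0 = [array.take m] := by
  unfold pvPart pvRun
  rw [List.range_eq_range']
  rw [pvTail array m 0 m 0 [] [] (by omega) h1 h2 (fun pos _ _ => by simp)]
  simp

-- mask with highest set bit j splits off array[j+1:m] as the last part
theorem pvPart_split (array : List Int) (m j idx : Nat) (hj : j < m - 1) (hm : m ≤ array.length)
    (hb : idx.testBit j) (hlt : idx < 2 ^ (j + 1)) :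
    pvPart array m idx = pvPart array (j + 1) idx ++ [(array.drop (j + 1)).take (m - (j + 1))] := by
  have hsplit : List.range m = List.range (j+1) ++ List.range' (j+1) (m-(j+1)) := by
    have h1 : m = (j+1) + (m - (j+1)) := by omega
    calc List.range m = List.range' 0 ((j+1) + (m-(j+1))) := by
            rw [List.range_eq_range', ← h1]
      _ = List.range' 0 (j+1) ++ List.range' (0+(j+1)) (m-(j+1)) := (List.range'_append_1).symm
      _ = List.range (j+1) ++ List.range' (j+1) (m-(j+1)) := by
            rw [← List.range_eq_range', Nat.zero_add]
  have hpre : (List.range (j+1)).foldl (pvStep array m idx) ([], []) = (pvPart array (j+1) idx, []) := by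
    have hcongr := PySem.List.foldl_congr_mem' (l := List.range (j+1))
      (f := pvStep array m idx) (g := pvStep array (j+1) idx)
      (init := (([], []) : List (List Int) × List Int))
      (by
        intro pos hpos acc
        rw [List.mem_range] at hpos
        have hiff : (((1 <<< pos) &&& idx ≠ 0) ∨ pos = m - 1) ↔
            (((1 <<< pos) &&& idx ≠ 0) ∨ pos = j + 1 - 1) := by
          by_cases hpj : pos = j
          · subst hpj
            have hbit : (1 <<< pos) &&& idx ≠ 0 := (pvBit pos idx).mpr hb
            exact ⟨fun _ => Or.inl hbit, fun _ => Or.inl hbit⟩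
          · have h1 : pos ≠ m - 1 := by omega
            have h2 : pos ≠ j + 1 - 1 := by omega
            simp [h1, hpj]
        simp only [pvStep]
        exact if_congr hiff rfl rfl)
    rw [hcongr]
    exact Prod.ext rfl (pvRun_snd array (j+1) idx (by omega))
  show (pvRun array m idx).1 = _
  have hrun : pvRun array m idx =
      (pvPart array (j+1) idx ++ [(array.drop (j+1)).take (m-(j+1))], []) := by
    unfold pvRun
    rw [hsplit, List.foldl_append, hpre]
    rw [pvTail array m idx (m-(j+1)) (j+1) (pvPart array (j+1) idx) [] (by omega) (by omega) hm
      (fun pos hp _ => by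
        simp [Nat.testBit_eq_false_of_lt
          (lt_of_lt_of_le hlt (Nat.pow_le_pow_right (by norm_num) hp))])]
    simp
  rw [hrun]

theorem pvPart_addpow (array : List Int) (j r : Nat) (hr : r < 2 ^ j) :
    pvPart array (j + 1) (2 ^ j + r) = pvPart array (j + 1) r := by
  unfold pvPart pvRun
  have := PySem.List.foldl_congr_mem' (l := List.range (j+1))
    (f := pvStep array (j+1) (2^j + r)) (g := pvStep array (j+1) r)
    (init := (([], []) : List (List Int) × List Int))
    (by
      intro pos hpos acc
      rw [List.mem_range] at hpos
      have hiff : (((1 <<< pos) &&& (2 ^ j + r) ≠ 0) ∨ pos = j + 1 - 1) ↔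
          (((1 <<< pos) &&& r ≠ 0) ∨ pos = j + 1 - 1) := by
        by_cases heq : pos = j + 1 - 1
        · simp [heq]
        · have hpj : pos < j := by omega
          simp only [heq, or_false]
          rw [pvBit, pvBit, Nat.testBit_two_pow_add_gt hpj]
      simp only [pvStep]
      exact if_congr hiff rfl rfl)
  rw [this]

theorem pvRange_pow (m : Nat) :
    List.range (2 ^ m) = 0 :: (List.range m).flatMap (fun j => List.range' (2 ^ j) (2 ^ j)) := by
  induction m with
  | zero => rfl
  | succ m ih =>
    have h2 : 2 ^ (m+1) = 2 ^ m + 2 ^ m := by ring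
    rw [h2, List.range_add, ← List.range'_eq_map_range, ih, List.range_succ,
      List.flatMap_append]
    simp

theorem pvAlt_nil (array : List Int) (k c : Nat) (h : c < k) : altParts array k c = [] := by
  match k, h with
  | 1, h => have : c = 0 := by omega
            simp [altParts, this]
  | (q+2), h => have : c - (q+1) = 0 := by omega
                simp [altParts, this]

theorem pvMain (array : List Int) (k : Nat) (hk : 1 ≤ k) :
    ∀ m, 1 ≤ m → m ≤ array.length →
    ((List.range (2 ^ (m - 1))).map (pvPart array m)).filter (fun p => p.length == k) =
      altParts array k m := by
  induction k with
  | zero => exact absurd hk (by omega)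
  | succ q ih =>
    intro m hm hlen
    rw [pvRange_pow (m-1), List.map_cons, List.map_flatMap, pvPart_zero array m hm hlen]
    have hblock : ∀ j ∈ List.range (m-1),
        (List.range' (2^j) (2^j)).map (pvPart array m) =
          ((List.range (2^j)).map (pvPart array (j+1))).map
            (fun p => p ++ [(array.drop (j+1)).take (m-(j+1))]) := by
      intro j hj
      rw [List.mem_range] at hj
      rw [List.range'_eq_map_range, List.map_map, List.map_map]
      apply List.map_eq_map_iff.mpr
      intro r hr
      rw [List.mem_range] at hr
      show pvPart array m (2^j + r) = _
      have hbit : (2^j + r).testBit j = true := by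
        simp [Nat.testBit_two_pow_add_eq, Nat.testBit_eq_false_of_lt hr]
      have hlt : 2^j + r < 2^(j+1) := by
        have h2 : 2^(j+1) = 2^j + 2^j := by ring
        omega
      rw [pvPart_split array m j (2^j+r) hj hlen hbit hlt, pvPart_addpow array j r hr]
      rfl
    rw [List.flatMap_congr hblock, List.filter_cons, List.filter_flatMap]
    cases q with
    | zero =>
      have hone : (([array.take m].length == 1) = true) := by simp
      simp only [hone, if_pos]
      have hnil : ∀ j ∈ List.range (m-1),
          (((List.range (2^j)).map (pvPart array (j+1))).map
            (fun p => p ++ [(array.drop (j+1)).take (m-(j+1))])).filter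
              (fun p => p.length == 1) = [] := by
        intro j _
        rw [List.filter_eq_nil_iff]
        intro p hp
        rw [List.map_map, List.mem_map] at hp
        obtain ⟨r, _, rfl⟩ := hp
        have := pvPart_pos array (j+1) r (by omega)
        simp only [Function.comp, List.length_append, List.length_cons, List.length_nil,
          beq_iff_eq]
        omega
      rw [List.flatMap_congr hnil]
      simp [altParts, hm]
    | succ p =>
      have hlen1 : (([array.take m].length == p + 1 + 1) = false) := by simp
      simp only [hlen1, Bool.false_eq_true, if_false]
      have hblk2 : ∀ j ∈ List.range (m-1),
          (((List.range (2^j)).map (pvPart array (j+1))).map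
            (fun pp => pp ++ [(array.drop (j+1)).take (m-(j+1))])).filter
              (fun pp => pp.length == p + 1 + 1) =
            (altParts array (p+1) (j+1)).map
              (fun pp => pp ++ [(array.drop (j+1)).take (m-(j+1))]) := by
        intro j hj
        rw [List.mem_range] at hj
        rw [List.filter_map]
        have hpred : (((List.range (2^j)).map (pvPart array (j+1))).filter
              ((fun pp => pp.length == p + 1 + 1) ∘
                (fun pp => pp ++ [(array.drop (j+1)).take (m-(j+1))]))) =
            ((List.range (2^j)).map (pvPart array (j+1))).filter
              (fun pp => pp.length == p + 1) := by
          apply List.filter_congr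
          intro x _
          simp
        rw [hpred]
        have hih := ih (by omega) (j+1) (by omega) (by omega)
        simp only [Nat.add_sub_cancel] at hih
        rw [hih]
      rw [List.flatMap_congr hblk2]
      show _ = altParts array (p+2) m
      rw [show altParts array (p+2) m =
        (List.range' (p+1) (m - (p+1))).flatMap
          (fun c => (altParts array (p+1) c).map
            (fun pp => pp ++ [(array.drop c).take (m - c)])) from rfl]
      have hreindex : (List.range (m-1)).flatMap
          (fun j => (altParts array (p+1) (j+1)).map
            (fun pp => pp ++ [(array.drop (j+1)).take (m-(j+1))])) =
          (List.range' 1 (m-1)).flatMap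
            (fun c => (altParts array (p+1) c).map
              (fun pp => pp ++ [(array.drop c).take (m - c)])) := by
        rw [List.range'_eq_map_range, List.flatMap_map]
        apply List.flatMap_congr
        intro j _
        rw [Nat.add_comm 1 j]
      rw [hreindex]
      by_cases hcase : p ≤ m - 1
      · have hsplit : List.range' 1 (m-1) =
            List.range' 1 p ++ List.range' (1+p) (m-1-p) := by
          have h : List.range' 1 p ++ List.range' (1+p) (m-1-p) =
              List.range' 1 (p + (m-1-p)) := List.range'_append_1
          rw [show p + (m-1-p) = m - 1 from by omega] at h
          exact h.symm
        rw [hsplit, List.flatMap_append]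
        have hnil2 : (List.range' 1 p).flatMap
            (fun c => (altParts array (p+1) c).map
              (fun pp => pp ++ [(array.drop c).take (m - c)])) = [] := by
          rw [List.flatMap_eq_nil_iff]
          intro c hc
          rw [pvAlt_nil array (p+1) c (by have := List.mem_range'_1.mp hc; omega)]
          rfl
        rw [hnil2, List.nil_append, show 1 + p = p + 1 from by omega,
          show m - 1 - p = m - (p+1) from by omega]
      · have h0 : m - (p+1) = 0 := by omega
        rw [h0, List.range'_zero, List.flatMap_nil, List.flatMap_eq_nil_iff]
        intro c hc
        rw [pvAlt_nil array (p+1) c (by have := List.mem_range'_1.mp hc; omega)]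
        rfl

-- ===== VERDICT (by name: the statement is the Claim_ definition above) =====
theorem produce_all_partitions_spec : Claim_equal_produce_all_partitions := by
  intro array L _ hpre
  have hne : array ≠ [] := hpre
  have hn : 1 ≤ array.length := by
    cases array with
    | nil => exact absurd rfl hne
    | cons a t => simp
  unfold Spec_produce_all_partitions produce_all_partitions_alt
  rw [pvA_shape]
  by_cases hL : L < 1
  · rw [if_pos hL]
    rw [List.filter_eq_nil_iff.mpr]
    intro p hp
    rw [List.mem_map] at hp
    obtain ⟨idx, _, rfl⟩ := hp
    have := pvPart_pos array array.length idx hn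
    simp only [decide_eq_true_eq]
    omega
  · rw [if_neg hL]
    have hcongr : ((List.range (2 ^ (array.length - 1))).map (pvPart array array.length)).filter
        (fun p => decide ((p.length : Int) = L)) =
        ((List.range (2 ^ (array.length - 1))).map (pvPart array array.length)).filter
        (fun p => p.length == L.toNat) := by
      apply List.filter_congr
      intro x _
      have hiff : ((x.length : Int) = L) ↔ (x.length = L.toNat) := by omega
      rw [Bool.eq_iff_iff]
      simp [hiff]
    rw [hcongr, pvMain array L.toNat (by omega) array.length hn (le_refl _)]
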